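-- pv_equiv track=rewrite | github.com/adrishg/binderDesign | 4_1_mapSeq2pdb.py | map_sequence_to_pdb
-- ===== SOURCE A (Python) =====
-- def map_sequence_to_pdb(sequence, pdb_lines, chain_id='A'):
--     """
--     Map a sequence to the backbone of a specified chain in the PDB file.
--
--     Args:
--         sequence: The designed sequence as a string.
--         pdb_lines: List of PDB file lines.
--         chain_id: Chain identifier for the binder.
--
--     Returns:
--         Modified PDB lines with the sequence mapped onto the backbone.
--     """
--     sequence = sequence.upper()
--     res_index = 0
--
--     three_letter_map = {
--         "A": "ALA", "R": "ARG", "N": "ASN", "D": "ASP",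
--         "C": "CYS", "E": "GLU", "Q": "GLN", "G": "GLY",
--         "H": "HIS", "I": "ILE", "L": "LEU", "K": "LYS",
--         "M": "MET", "F": "PHE", "P": "PRO", "S": "SER",
--         "T": "THR", "W": "TRP", "Y": "TYR", "V": "VAL"
--     }
--
--     modified_lines = []
--     current_residue_number = None
--
--     for line in pdb_lines:
--         if line.startswith("ATOM") and line[21] == chain_id:
--             # Get the residue number from the line
--             residue_number = line[22:26].strip()
--
--             # If this is a new residue, update the residue name
--             if residue_number != current_residue_number:
--                 if res_index >= len(sequence):
--                     raise ValueError("Sequence is longer than the residues in the PDB file for chain A.")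
--                 current_residue_number = residue_number
--                 new_residue_name = three_letter_map.get(sequence[res_index])
--                 if not new_residue_name:
--                     raise ValueError(f"Unknown amino acid: {sequence[res_index]}")
--                 res_index += 1
--
--             # Replace the residue name in the PDB line
--             line = line[:17] + f"{new_residue_name:>3}" + line[20:]
--
--         modified_lines.append(line)
--
--     if res_index != len(sequence):
--         raise ValueError("The sequence length does not match the number of residues in the PDB backbone for chain A, please double check (:.")
--
--     return modified_lines
-- ===== SOURCE B (Python) =====
-- def map_sequence_to_pdb(sequence, pdb_lines, chain_id='A'):
--     """
--     Two-pass rewrite: first collect the residue-number runs of the chain's ATOM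
--     lines and map each run to its three-letter name, then rewrite the lines.
--     """
--     sequence = sequence.upper()
--
--     three_letter_map = {
--         "A": "ALA", "R": "ARG", "N": "ASN", "D": "ASP",
--         "C": "CYS", "E": "GLU", "Q": "GLN", "G": "GLY",
--         "H": "HIS", "I": "ILE", "L": "LEU", "K": "LYS",
--         "M": "MET", "F": "PHE", "P": "PRO", "S": "SER",
--         "T": "THR", "W": "TRP", "Y": "TYR", "V": "VAL"
--     }
--
--     def is_chain_atom(line):
--         return line.startswith("ATOM") and line[21] == chain_id
--
--     nums = [line[22:26].strip() for line in pdb_lines if is_chain_atom(line)]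
--     # a run starts wherever the residue number differs from the previous one
--     flags = [p != n for p, n in zip([None] + nums, nums)]
--     n_runs = sum(flags)
--     if n_runs > len(sequence):
--         raise ValueError("Sequence is longer than the residues in the PDB file for chain A.")
--     names = []
--     for ch in sequence[:n_runs]:
--         name = three_letter_map.get(ch)
--         if not name:
--             raise ValueError(f"Unknown amino acid: {ch}")
--         names.append(name)
--     if n_runs != len(sequence):
--         raise ValueError("The sequence length does not match the number of residues in the PDB backbone for chain A, please double check (:.")
--
--     per_chain_line = []
--     r = -1
--     for f in flags:
--         r += f
--         per_chain_line.append(names[r])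
--
--     it = iter(per_chain_line)
--     return [line[:17] + f"{next(it):>3}" + line[20:] if is_chain_atom(line) else line
--             for line in pdb_lines]
-- ===== Notes on version B (the rewrite author's own statement) =====
-- stated objective: alternative
-- what changed: A interleaves sequence consumption, validation and line rewriting in one stateful loop; B first extracts the chain's residue-number list, computes the run-start flags and the per-line three-letter names as whole-list transformations, validates the lengths up front, and then rewrites the lines in a separate comprehension consuming the precomputed names.
import Mathlib
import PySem

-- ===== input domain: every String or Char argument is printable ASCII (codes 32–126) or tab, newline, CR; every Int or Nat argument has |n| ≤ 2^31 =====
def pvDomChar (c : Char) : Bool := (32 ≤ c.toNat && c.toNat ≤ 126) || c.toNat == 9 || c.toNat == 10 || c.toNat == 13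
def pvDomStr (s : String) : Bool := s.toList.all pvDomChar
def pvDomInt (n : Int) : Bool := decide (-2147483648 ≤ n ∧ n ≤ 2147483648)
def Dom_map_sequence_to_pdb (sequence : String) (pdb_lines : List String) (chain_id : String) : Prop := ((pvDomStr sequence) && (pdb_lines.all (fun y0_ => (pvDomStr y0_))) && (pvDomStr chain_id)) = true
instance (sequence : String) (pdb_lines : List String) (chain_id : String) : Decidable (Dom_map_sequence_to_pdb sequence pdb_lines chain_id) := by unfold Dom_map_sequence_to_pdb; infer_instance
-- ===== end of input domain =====

-- B re-decomposes A's single stateful loop into whole-list passes (extract residue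
-- numbers, flag run starts, precompute per-line names, rewrite); same cost, alternative structure.

-- ===== PORT A =====
-- shared data/format helpers (the same dict literal / f-string appears in both Pythons)
def pvAA (c : Char) : Option (List Char) :=
  match c with
  | 'A' => some ['A','L','A'] | 'R' => some ['A','R','G'] | 'N' => some ['A','S','N']
  | 'D' => some ['A','S','P'] | 'C' => some ['C','Y','S'] | 'E' => some ['G','L','U']
  | 'Q' => some ['G','L','N'] | 'G' => some ['G','L','Y'] | 'H' => some ['H','I','S']
  | 'I' => some ['I','L','E'] | 'L' => some ['L','E','U'] | 'K' => some ['L','Y','S']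
  | 'M' => some ['M','E','T'] | 'F' => some ['P','H','E'] | 'P' => some ['P','R','O']
  | 'S' => some ['S','E','R'] | 'T' => some ['T','H','R'] | 'W' => some ['T','R','P']
  | 'Y' => some ['T','Y','R'] | 'V' => some ['V','A','L'] | _ => none

def pvRJ3 (s : List Char) : List Char := List.replicate (3 - s.length) ' ' ++ s   -- f"{s:>3}"

def pvRewrite (l nm : List Char) : List Char :=
  PySem.List.slice l none (some 17) ++ pvRJ3 nm ++ PySem.List.slice l (some 20) none

def pvIsATOM (l : List Char) : Bool := PySem.Chars.startswith l ['A','T','O','M']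

def pvNum (l : List Char) : List Char := PySem.Chars.strip (PySem.List.slice l (some 22) (some 26))

-- A's loop: state (res_index, current_residue_number, new_residue_name); none = a raise
def pvGoA (seqU chain : List Char) (ls : List (List Char)) (k : Nat)
    (cur : Option (List Char)) (nm : List Char) : Option (Nat × List (List Char)) :=
  match ls with
  | [] => some (k, [])
  | l :: rest =>
    if pvIsATOM l then
      match PySem.List.pyGet? l 21 with
      | none => none                                   -- IndexError
      | some c =>
        if [c] = chain then
          if some (pvNum l) ≠ cur then
            if seqU.length ≤ k then none               -- "Sequence is longer …"
            else
              match PySem.List.pyGet? seqU (k : Int) with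
              | none => none
              | some ch =>
                match pvAA ch with
                | none => none                         -- "Unknown amino acid …"
                | some nm' =>
                  (pvGoA seqU chain rest (k+1) (some (pvNum l)) nm').map
                    (fun p => (p.1, pvRewrite l nm' :: p.2))
          else (pvGoA seqU chain rest k cur nm).map (fun p => (p.1, pvRewrite l nm :: p.2))
        else (pvGoA seqU chain rest k cur nm).map (fun p => (p.1, l :: p.2))
    else (pvGoA seqU chain rest k cur nm).map (fun p => (p.1, l :: p.2))

def map_sequence_to_pdb (sequence : String) (pdb_lines : List String) (chain_id : String) : List String :=
  match pvGoA (PySem.Chars.upper sequence.toList) chain_id.toList (pdb_lines.map String.toList) 0 none [] with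
  | none => []
  | some p =>
    if p.1 = (PySem.Chars.upper sequence.toList).length    -- final length check
    then p.2.map (fun l => String.ofList l) else []

-- ===== PORT B =====
def pvIsChainAtom? (chain l : List Char) : Option Bool :=
  if pvIsATOM l then (PySem.List.pyGet? l 21).map (fun c => decide ([c] = chain)) else some false

def pvNums? (chain : List Char) (ls : List (List Char)) : Option (List (List Char)) :=
  match ls with
  | [] => some []
  | l :: rest =>
    match pvIsChainAtom? chain l with
    | none => none
    | some true => (pvNums? chain rest).map (pvNum l :: ·)
    | some false => pvNums? chain rest

def pvFlags (nums : List (List Char)) : List Bool :=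
  (List.zip (none :: nums.map some) nums).map (fun pn => pn.1 != some pn.2)

def pvNames? (cs : List Char) : Option (List (List Char)) :=
  match cs with
  | [] => some []
  | c :: rest =>
    match pvAA c with
    | none => none
    | some nm => (pvNames? rest).map (nm :: ·)

def pvPerLine? (names : List (List Char)) (flags : List Bool) (r : Int) : Option (List (List Char)) :=
  match flags with
  | [] => some []
  | f :: rest =>
    match PySem.List.pyGet? names (if f then r + 1 else r) with
    | none => none
    | some nm => (pvPerLine? names rest (if f then r + 1 else r)).map (nm :: ·)

def pvRewriteB? (chain : List Char) (ls pl : List (List Char)) : Option (List (List Char)) :=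
  match ls with
  | [] => some []
  | l :: rest =>
    match pvIsChainAtom? chain l with
    | none => none
    | some true =>
      match pl with
      | [] => none
      | nm :: plr => (pvRewriteB? chain rest plr).map (pvRewrite l nm :: ·)
    | some false => (pvRewriteB? chain rest pl).map (l :: ·)

def map_sequence_to_pdb_alt (sequence : String) (pdb_lines : List String) (chain_id : String) : List String :=
  let seqU := PySem.Chars.upper sequence.toList
  let ls := pdb_lines.map String.toList
  let chain := chain_id.toList
  match pvNums? chain ls with
  | none => []
  | some nums =>
    let flags := pvFlags nums
    let nruns := flags.count true
    if seqU.length < nruns then []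
    else
      match pvNames? (PySem.List.slice seqU none (some (nruns : Int))) with
      | none => []
      | some names =>
        if nruns ≠ seqU.length then []
        else
          match pvPerLine? names flags (-1) with
          | none => []
          | some pl =>
            match pvRewriteB? chain ls pl with
            | none => []
            | some out => out.map (fun l => String.ofList l)

-- ===== PRECONDITION & SPEC =====
-- run counter used only by Pre_: length of the consecutive-deduplicated residue-number list
def pvRunsGo (prev : List Char) (t : List (List Char)) : Nat :=
  match t with
  | [] => 0
  | n :: t => if n = prev then pvRunsGo prev t else pvRunsGo n t + 1

def pvRuns (nums : List (List Char)) : Nat :=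
  match nums with
  | [] => 0
  | n :: t => pvRunsGo n t + 1

-- Pre_ excludes exactly the inputs where A raises: an IndexError on an "ATOM" line shorter
-- than 22 characters, and the three ValueErrors (run count ≠ sequence length, unknown letter).
def Pre_map_sequence_to_pdb (sequence : String) (pdb_lines : List String) (chain_id : String) : Prop :=
  (∀ l ∈ pdb_lines.map String.toList, PySem.Chars.startswith l ['A','T','O','M'] = true → 22 ≤ l.length)
  ∧ pvRuns (((pdb_lines.map String.toList).filter
        (fun l => PySem.Chars.startswith l ['A','T','O','M'] && ((l.drop 21).take 1 == chain_id.toList))).map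
        (fun l => PySem.Chars.strip ((l.drop 22).take 4)))
      = (PySem.Chars.upper sequence.toList).length
  ∧ ((PySem.Chars.upper sequence.toList).all
      (fun c => (['A','R','N','D','C','E','Q','G','H','I','L','K','M','F','P','S','T','W','Y','V'] : List Char).contains c)) = true

instance (sequence : String) (pdb_lines : List String) (chain_id : String) : Decidable (Pre_map_sequence_to_pdb sequence pdb_lines chain_id) := by unfold Pre_map_sequence_to_pdb; infer_instance

def pvWitness_map_sequence_to_pdb : String × List String × String :=
  ("g", ["ATOM                 A   1", "TER"], "A")

def Spec_map_sequence_to_pdb (sequence : String) (pdb_lines : List String) (chain_id : String) (out : List String) : Prop := out = map_sequence_to_pdb_alt sequence pdb_lines chain_id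
instance (sequence : String) (pdb_lines : List String) (chain_id : String) (out : List String) : Decidable (Spec_map_sequence_to_pdb sequence pdb_lines chain_id out) := by unfold Spec_map_sequence_to_pdb; infer_instance

-- ===== CLAIM (what is proved, stated in full; the proofs are below) =====
def Claim_equal_map_sequence_to_pdb : Prop := ∀ (sequence : String) (pdb_lines : List String) (chain_id : String), Dom_map_sequence_to_pdb sequence pdb_lines chain_id → Pre_map_sequence_to_pdb sequence pdb_lines chain_id → Spec_map_sequence_to_pdb sequence pdb_lines chain_id (map_sequence_to_pdb sequence pdb_lines chain_id)

-- ===== LEMMAS AND PROOFS =====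

-- proof-side run counter relative to a previous number
def pvCountRuns (cur : Option (List Char)) (nums : List (List Char)) : Nat :=
  match nums with
  | [] => 0
  | n :: t => if some n = cur then pvCountRuns cur t else pvCountRuns (some n) t + 1

-- proof-side spec of B's per-chain-line name list
def pvPL (names : List (List Char)) (nums : List (List Char)) (cur : Option (List Char)) (k : Nat) : List (List Char) :=
  match nums with
  | [] => []
  | n :: t => if some n = cur then names.getD (k-1) [] :: pvPL names t cur k
              else names.getD k [] :: pvPL names t (some n) (k+1)

def pvFlagsFrom (cur : Option (List Char)) (nums : List (List Char)) : List Bool :=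
  match nums with
  | [] => []
  | n :: t => (cur != some n) :: pvFlagsFrom (some n) t

lemma pvFlags_eq (cur : Option (List Char)) (nums : List (List Char)) :
    (List.zip (cur :: nums.map some) nums).map (fun pn => pn.1 != some pn.2) = pvFlagsFrom cur nums := by
  induction nums generalizing cur with
  | nil => rfl
  | cons n t ih => simp only [List.map_cons, List.zip_cons_cons, pvFlagsFrom, ih]

lemma pvCount_flags (cur : Option (List Char)) (nums : List (List Char)) :
    (pvFlagsFrom cur nums).count true = pvCountRuns cur nums := by
  induction nums generalizing cur with
  | nil => rfl
  | cons n t ih =>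
    simp only [pvFlagsFrom, pvCountRuns, List.count_cons, ih]
    by_cases h : some n = cur
    · subst h; simp [bne]
    · have hb : (cur != some n) = true := by
        simpa [bne_iff_ne] using fun e => h e.symm
      simp [hb, h]

lemma pvRunsGo_eq (p : List Char) (t : List (List Char)) :
    pvRunsGo p t = pvCountRuns (some p) t := by
  induction t generalizing p with
  | nil => rfl
  | cons n t ih =>
    simp only [pvRunsGo, pvCountRuns]
    by_cases h : n = p
    · subst h; simp [ih]
    · have h2 : ¬ (some n = some p) := by simpa using h
      simp [h, h2, ih]

lemma pvRuns_eq (nums : List (List Char)) : pvRuns nums = pvCountRuns none nums := by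
  cases nums with
  | nil => rfl
  | cons n t => simp [pvRuns, pvCountRuns, pvRunsGo_eq]

lemma pvNums?_eq (chain : List Char) (ls : List (List Char))
    (h : ∀ l ∈ ls, pvIsATOM l = true → 22 ≤ l.length) :
    pvNums? chain ls = some ((ls.filter
      (fun l => pvIsATOM l && ((l.drop 21).take 1 == chain))).map
      (fun l => PySem.Chars.strip ((l.drop 22).take 4))) := by
  induction ls with
  | nil => rfl
  | cons l rest ih =>
    have ihr := ih (fun x hx => h x (by simp [hx]))
    by_cases hA : pvIsATOM l = true
    · have hlen : 22 ≤ l.length := h l (by simp) hA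
      have h21 : 21 < l.length := by omega
      have hg : PySem.List.pyGet? l 21 = some l[21] := by
        have := PySem.List.pyGet?_ofNat (n := 21) (xs := l) h21
        simpa using this
      have hd : l.drop 21 = l[21] :: l.drop 22 := List.drop_eq_getElem_cons h21
      have hnum : PySem.Chars.strip (PySem.List.slice l (some 22) (some 26)) =
          PySem.Chars.strip ((l.drop 22).take 4) := by
        rw [show ((22:Int)) = ((22:Nat):Int) from by norm_num,
            show ((26:Int)) = ((26:Nat):Int) from by norm_num,
            PySem.List.slice_natCast]
      by_cases hc : [l[21]] = chain
      · simp only [pvNums?, pvIsChainAtom?, hA, if_true, hg, Option.map_some, hc,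
          decide_true, ihr, List.filter_cons, hd, List.take_succ_cons, List.take_zero]
        simp [pvNum, hnum]
      · simp only [pvNums?, pvIsChainAtom?, hA, if_true, hg, Option.map_some,
          hc, decide_false, ihr, List.filter_cons, hd,
          List.take_succ_cons, List.take_zero]
        simp [hc]
    · simp only [pvNums?, pvIsChainAtom?, hA]
      simp only [Bool.not_eq_true] at hA
      simp [hA, ihr]

lemma pvNames?_total (cs : List Char) (h : ∀ c ∈ cs, (pvAA c).isSome) :
    ∃ ns, pvNames? cs = some ns := by
  induction cs with
  | nil => exact ⟨[], rfl⟩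
  | cons c t ih =>
    obtain ⟨nm, hnm⟩ := Option.isSome_iff_exists.mp (h c (by simp))
    obtain ⟨ns, hns⟩ := ih (fun x hx => h x (by simp [hx]))
    exact ⟨nm :: ns, by simp [pvNames?, hnm, hns]⟩

lemma pvNames?_spec (cs : List Char) (ns : List (List Char)) (h : pvNames? cs = some ns) :
    ns.length = cs.length ∧
    ∀ k, k < cs.length → ∃ c, PySem.List.pyGet? cs (k : Int) = some c ∧ pvAA c = some (ns.getD k []) := by
  induction cs generalizing ns with
  | nil =>
    simp only [pvNames?, Option.some.injEq] at h
    subst h; exact ⟨rfl, by simp⟩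
  | cons c t ih =>
    simp only [pvNames?] at h
    cases haa : pvAA c with
    | none => simp [haa] at h
    | some nm =>
      rw [haa] at h
      cases ht : pvNames? t with
      | none => simp [ht] at h
      | some ns' =>
        rw [ht] at h
        simp only [Option.map_some, Option.some.injEq] at h
        subst h
        obtain ⟨hl, hk⟩ := ih ns' ht
        refine ⟨by simp [hl], ?_⟩
        intro k hk2
        cases k with
        | zero => exact ⟨c, by simp, by simpa using haa⟩
        | succ m =>
          obtain ⟨c', h1, h2⟩ := hk m (by simpa using hk2)
          refine ⟨c', ?_, by simpa using h2⟩
          rw [show ((m+1 : Nat) : Int) = (m : Int) + 1 by push_cast; ring]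
          rw [PySem.List.pyGet?_cons_succ]
          exact h1

lemma pvGetNames (names : List (List Char)) (j : Nat) (hj : j < names.length) :
    PySem.List.pyGet? names (j : Int) = some (names.getD j []) := by
  rw [PySem.List.pyGet?_natCast]
  simp [List.getElem?_eq_getElem hj]

lemma pvPerLine_eq (names : List (List Char)) :
    ∀ (nums : List (List Char)) (cur : Option (List Char)) (k : Nat),
    k + pvCountRuns cur nums ≤ names.length →
    (cur = none → k = 0) →
    (cur ≠ none → 1 ≤ k) →
    pvPerLine? names (pvFlagsFrom cur nums) ((k : Int) - 1) = some (pvPL names nums cur k) := by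
  intro nums
  induction nums with
  | nil => intro cur k _ _ _; rfl
  | cons n t ih =>
    intro cur k hb h0 h1
    by_cases h : some n = cur
    · subst h
      have hk1 : 1 ≤ k := h1 (by simp)
      have hbt : k + pvCountRuns (some n) t ≤ names.length := by
        simpa [pvCountRuns] using hb
      have hkm : k - 1 < names.length := by omega
      have hcast : ((k : Int) - 1) = ((k - 1 : Nat) : Int) := by omega
      have hflag : (some n != some n) = false := by simp
      simp only [pvFlagsFrom, pvPerLine?, hflag, Bool.false_eq_true, if_false, hcast,
        pvGetNames names (k-1) hkm]
      rw [show ((k - 1 : Nat) : Int) = (k : Int) - 1 from by omega,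
        ih (some n) k hbt (by simp) (fun _ => hk1)]
      simp [pvPL]
    · have hflag : (cur != some n) = true := by
        simpa [bne_iff_ne] using fun e => h e.symm
      have hbt : (k + 1) + pvCountRuns (some n) t ≤ names.length := by
        have : pvCountRuns cur (n :: t) = pvCountRuns (some n) t + 1 := by
          simp [pvCountRuns, h]
        omega
      have hk : k < names.length := by omega
      have hcast : ((k : Int) - 1 + 1) = ((k : Nat) : Int) := by ring
      simp only [pvFlagsFrom, pvPerLine?, hflag, if_true, hcast,
        pvGetNames names k hk]
      rw [show ((k : Nat) : Int) = ((k + 1 : Nat) : Int) - 1 from by omega,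
        ih (some n) (k+1) hbt (by simp) (fun _ => by omega)]
      simp [pvPL, h]

lemma pvMain (seqU chain : List Char) (names : List (List Char))
    (hAA : ∀ k, k < names.length →
      ∃ c, PySem.List.pyGet? seqU (k : Int) = some c ∧ pvAA c = some (names.getD k [])) :
    ∀ (ls : List (List Char)) (k : Nat) (cur : Option (List Char)) (nm : List Char)
      (ns : List (List Char)),
    pvNums? chain ls = some ns →
    k + pvCountRuns cur ns ≤ names.length →
    (cur = none → k = 0) →
    (cur ≠ none → 1 ≤ k ∧ nm = names.getD (k-1) []) →
    ∃ out, pvGoA seqU chain ls k cur nm = some (k + pvCountRuns cur ns, out)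
        ∧ pvRewriteB? chain ls (pvPL names ns cur k) = some out := by
  intro ls
  induction ls with
  | nil =>
    intro k cur nm ns hns _ _ _
    simp only [pvNums?, Option.some.injEq] at hns
    subst hns
    exact ⟨[], by simp [pvGoA, pvCountRuns], by simp [pvRewriteB?]⟩
  | cons l rest ih =>
    intro k cur nm ns hns hb h0 h1
    simp only [pvNums?] at hns
    cases hC : pvIsChainAtom? chain l with
    | none => rw [hC] at hns; cases hns
    | some b =>
      rw [hC] at hns
      cases b with
      | false =>
        -- not a chain-A ATOM line: passed through by both
        simp only at hns
        obtain ⟨out, hA, hB⟩ := ih k cur nm ns hns hb h0 h1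
        refine ⟨l :: out, ?_, ?_⟩
        · by_cases hAt : pvIsATOM l = true
          · simp only [pvIsChainAtom?, hAt, if_true] at hC
            cases hg : PySem.List.pyGet? l 21 with
            | none => rw [hg] at hC; cases hC
            | some c =>
              rw [hg] at hC
              simp only [Option.map_some, Option.some.injEq, decide_eq_false_iff_not] at hC
              simp [pvGoA, hAt, hg, hC, hA]
          · simp only [Bool.not_eq_true] at hAt
            simp [pvGoA, hAt, hA]
        · simp [pvRewriteB?, hC, hB]
      | true =>
        simp only at hns
        cases hns' : pvNums? chain rest with
        | none => rw [hns'] at hns; cases hns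
        | some ns' =>
          rw [hns'] at hns
          simp only [Option.map_some, Option.some.injEq] at hns
          subst hns
          -- unpack the chain-line test
          have hAt : pvIsATOM l = true := by
            by_contra hAt
            simp [pvIsChainAtom?, hAt] at hC
          obtain ⟨c, hg, hc⟩ : ∃ c, PySem.List.pyGet? l 21 = some c ∧ [c] = chain := by
            simp only [pvIsChainAtom?, hAt, if_true] at hC
            cases hg : PySem.List.pyGet? l 21 with
            | none => rw [hg] at hC; cases hC
            | some c =>
              rw [hg] at hC
              simp only [Option.map_some, Option.some.injEq, decide_eq_true_eq] at hC
              exact ⟨c, rfl, hC⟩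
          by_cases hnum : some (pvNum l) = cur
          · -- same residue as the previous chain line
            have hcur : cur ≠ none := by rw [← hnum]; simp
            obtain ⟨hk1, hnm⟩ := h1 hcur
            have hbt : k + pvCountRuns cur ns' ≤ names.length := by
              have : pvCountRuns cur (pvNum l :: ns') = pvCountRuns cur ns' := by
                simp [pvCountRuns, hnum]
              omega
            obtain ⟨out, hA, hB⟩ := ih k cur nm ns' hns' hbt h0 h1
            refine ⟨pvRewrite l nm :: out, ?_, ?_⟩
            · have hcnt : pvCountRuns cur (pvNum l :: ns') = pvCountRuns cur ns' := by
                simp [pvCountRuns, hnum]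
              simp [pvGoA, hAt, hg, hc, hnum, hA, hcnt]
            · simp [pvRewriteB?, hC, pvPL, hnum, hnm, List.getD, hB]
          · -- a new residue run starts here
            have hcnt : pvCountRuns cur (pvNum l :: ns') = pvCountRuns (some (pvNum l)) ns' + 1 := by
              simp [pvCountRuns, hnum]
            have hk : k < names.length := by omega
            obtain ⟨ch, hgc, haac⟩ := hAA k hk
            have hbt : (k + 1) + pvCountRuns (some (pvNum l)) ns' ≤ names.length := by omega
            obtain ⟨out, hA, hB⟩ := ih (k+1) (some (pvNum l)) (names.getD k []) ns' hns' hbt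
              (by simp) (fun _ => ⟨by omega, by simp⟩)
            refine ⟨pvRewrite l (names.getD k []) :: out, ?_, ?_⟩
            · have hnle : ¬ seqU.length ≤ k := by
                have ⟨c', hgc', _⟩ := hAA k hk
                by_contra hle
                rw [PySem.List.pyGet?_natCast] at hgc'
                simp [List.getElem?_eq_none (by omega : seqU.length ≤ k)] at hgc'
              simp only [pvGoA, hAt, if_true, hg, hc,
                if_pos (by exact fun e => hnum e), hnle, if_false, hgc, haac, hA, Option.map_some]
              simp only [Option.some.injEq, Prod.mk.injEq]
              exact ⟨by omega, trivial⟩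
            · simp [pvRewriteB?, hC, pvPL, hnum, hB]

lemma pvAA_mem : ∀ c ∈ (['A','R','N','D','C','E','Q','G','H','I','L','K','M','F','P','S','T','W','Y','V'] : List Char), (pvAA c).isSome := by
  intro c hc; fin_cases hc <;> rfl

-- ===== VERDICT (by name: the statement is the Claim_ definition above) =====
theorem map_sequence_to_pdb_spec : Claim_equal_map_sequence_to_pdb := by
  intro sequence pdb_lines chain_id _ hpre
  obtain ⟨h1, h2, h3⟩ := hpre
  unfold Spec_map_sequence_to_pdb
  have h1' : ∀ l ∈ pdb_lines.map String.toList, pvIsATOM l = true → 22 ≤ l.length := h1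
  have hnums := pvNums?_eq chain_id.toList (pdb_lines.map String.toList) h1'
  generalize hN : ((pdb_lines.map String.toList).filter
      (fun l => pvIsATOM l && ((l.drop 21).take 1 == chain_id.toList))).map
      (fun l => PySem.Chars.strip ((l.drop 22).take 4)) = nums at hnums
  have hcnt : pvCountRuns none nums = (PySem.Chars.upper sequence.toList).length := by
    rw [← pvRuns_eq, ← hN]; exact h2
  have hmem : ∀ c ∈ PySem.Chars.upper sequence.toList, (pvAA c).isSome := by
    intro c hc
    have := List.all_eq_true.mp h3 c hc
    exact pvAA_mem c (by simpa using this)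
  obtain ⟨names, hnames⟩ := pvNames?_total _ hmem
  obtain ⟨hlen, hidx⟩ := pvNames?_spec _ _ hnames
  have hAA : ∀ k, k < names.length →
      ∃ c, PySem.List.pyGet? (PySem.Chars.upper sequence.toList) (k : Int) = some c ∧
        pvAA c = some (names.getD k []) := fun k hk => hidx k (by omega)
  have hbound : 0 + pvCountRuns none nums ≤ names.length := by omega
  obtain ⟨out, hGo, hRw⟩ := pvMain _ chain_id.toList names hAA (pdb_lines.map String.toList)
    0 none [] nums hnums hbound (fun _ => rfl) (fun h => absurd rfl h)
  have hflags : pvFlags nums = pvFlagsFrom none nums := pvFlags_eq none nums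
  have hnr : (pvFlags nums).count true = (PySem.Chars.upper sequence.toList).length := by
    rw [hflags, pvCount_flags, hcnt]
  have hPL := pvPerLine_eq names nums none 0 (by omega) (fun _ => rfl) (fun h => absurd rfl h)
  norm_num at hPL
  simp only [map_sequence_to_pdb, map_sequence_to_pdb_alt, hGo, hnums, Nat.zero_add, hcnt,
    hflags]
  have hnr' : List.count true (pvFlagsFrom none nums) = (PySem.Chars.upper sequence.toList).length := by
    rw [pvCount_flags, hcnt]
  simp [hnr', hnames, hPL, hRw]
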